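-- pv_equiv track=rewrite | github.com/OpenDaL/datacatalog-frontend | django/datacatalog/dcsearch/views.py | _get_additional_criteria
-- ===== SOURCE A (Python) =====
-- empty_payloads = set(['*', ''])
--
-- ADDITONAL_CRITERIA = {
--     "type": "type",
--     "subject": "subject",
--     "format": "format",
--     "language": "language",
--     "bbox": "location",
--     "created": "created date",
--     "issued": "issued date",
--     "modified": "modified date",
--     "timeperiod": "temporal coverage"
-- }
--
-- def _payload_is_valid(str_):
--     """
--     Check if a POST value is valid data
--     """
--     return str_ is not None and str_ not in empty_payloads
--
-- def _get_additional_criteria(post_data):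
--     """
--     Count which main criteria the user has used in their query
--
--     Args:
--         post_data --- dict: The user query sent in the post request
--
--     Returns:
--         int --- The number of search criteria defined in the query
--     """
--     additional_criteria = []
--     for crit in ADDITONAL_CRITERIA:
--         for k, v in post_data.items():
--             if crit in k and _payload_is_valid(v):
--                 additional_criteria.append(ADDITONAL_CRITERIA[crit])
--                 break
--
--     return additional_criteria
-- ===== SOURCE B (Python) =====
-- empty_payloads = set(['*', ''])
--
-- ADDITONAL_CRITERIA = {
--     "type": "type",
--     "subject": "subject",
--     "format": "format",
--     "language": "language",
--     "bbox": "location",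
--     "created": "created date",
--     "issued": "issued date",
--     "modified": "modified date",
--     "timeperiod": "temporal coverage"
-- }
--
-- def _payload_is_valid(str_):
--     return str_ is not None and str_ not in empty_payloads
--
-- def _get_additional_criteria(post_data):
--     # One pass over post_data: collect every criterion that occurs in a key
--     # with a valid payload, then emit labels in ADDITONAL_CRITERIA order.
--     present = set()
--     for k, v in post_data.items():
--         if _payload_is_valid(v):
--             for crit in ADDITONAL_CRITERIA:
--                 if crit in k:
--                     present.add(crit)
--     return [ADDITONAL_CRITERIA[crit] for crit in ADDITONAL_CRITERIA if crit in present]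
-- ===== Notes on version B (the rewrite author's own statement) =====
-- stated objective: alternative
-- what changed: Replaces A's per-criterion scan of post_data with early break by a single pass over post_data that accumulates a presence set of criteria, followed by a separate output pass over ADDITONAL_CRITERIA.
import Mathlib
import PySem

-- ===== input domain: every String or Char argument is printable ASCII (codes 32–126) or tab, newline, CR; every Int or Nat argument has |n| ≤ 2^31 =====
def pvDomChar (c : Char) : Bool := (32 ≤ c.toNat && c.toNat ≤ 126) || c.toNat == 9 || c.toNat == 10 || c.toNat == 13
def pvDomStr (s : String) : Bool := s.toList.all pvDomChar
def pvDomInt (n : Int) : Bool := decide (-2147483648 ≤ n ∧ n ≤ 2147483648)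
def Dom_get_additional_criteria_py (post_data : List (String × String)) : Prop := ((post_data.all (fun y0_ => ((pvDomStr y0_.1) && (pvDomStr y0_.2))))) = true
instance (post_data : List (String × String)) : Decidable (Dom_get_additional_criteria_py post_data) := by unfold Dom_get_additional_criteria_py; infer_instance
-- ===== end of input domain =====

-- B replaces A's per-criterion scan-with-break over post_data by one pass over post_data
-- building a presence set of criteria, then emits labels in criteria order (alternative decomposition).


-- shared module context: ADDITONAL_CRITERIA (insertion order) and _payload_is_valid
def pvCriteria : List (String × String) :=
  [("type", "type"), ("subject", "subject"), ("format", "format"), ("language", "language"),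
   ("bbox", "location"), ("created", "created date"), ("issued", "issued date"),
   ("modified", "modified date"), ("timeperiod", "temporal coverage")]

def payload_is_valid (s : String) : Bool := !(s == "*" || s == "")

-- ===== PORT A =====
-- inner 'for k, v in post_data.items(): … break' loop of A
def pvInnerA (crit label : String) (acc : List String) : List (String × String) → List String
  | [] => acc
  | (k, v) :: rest =>
      if PySem.Str.isIn crit k && payload_is_valid v then acc ++ [label]
      else pvInnerA crit label acc rest

def get_additional_criteria_py (post_data : List (String × String)) : List String :=
  pvCriteria.foldl (fun acc cr => pvInnerA cr.1 cr.2 acc post_data) []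

-- ===== PORT B =====
-- 'for crit in ADDITONAL_CRITERIA: if crit in k: present.add(crit)'
def pvMarkKey (s : PySem.Set String) (k : String) : PySem.Set String :=
  pvCriteria.foldl (fun s' cr => if PySem.Str.isIn cr.1 k then PySem.Set.add s' cr.1 else s') s

def get_additional_criteria_py_alt (post_data : List (String × String)) : List String :=
  let present : PySem.Set String :=
    post_data.foldl (fun s p => if payload_is_valid p.2 then pvMarkKey s p.1 else s) PySem.Set.empty
  (pvCriteria.filter (fun cr => PySem.Set.contains present cr.1)).map Prod.snd

-- ===== PRECONDITION & SPEC =====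
def Spec_get_additional_criteria_py (post_data : List (String × String)) (out : List String) : Prop := out = get_additional_criteria_py_alt post_data
instance (post_data : List (String × String)) (out : List String) : Decidable (Spec_get_additional_criteria_py post_data out) := by unfold Spec_get_additional_criteria_py; infer_instance

-- ===== CLAIM (what is proved, stated in full; the proofs are below) =====
def Claim_equal_get_additional_criteria_py : Prop := ∀ (post_data : List (String × String)), Dom_get_additional_criteria_py post_data → Spec_get_additional_criteria_py post_data (get_additional_criteria_py post_data)

-- ===== LEMMAS AND PROOFS =====

-- A's inner loop returns acc ++ [label] iff some item matches
theorem pvInnerA_eq (crit label : String) (acc : List String) (items : List (String × String)) :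
    pvInnerA crit label acc items =
      if items.any (fun p => PySem.Str.isIn crit p.1 && payload_is_valid p.2) then acc ++ [label]
      else acc := by
  induction items with
  | nil => simp [pvInnerA]
  | cons hd tl ih =>
    obtain ⟨k, v⟩ := hd
    simp only [pvInnerA, List.any_cons, ih, Bool.or_eq_true]
    by_cases h : (PySem.Str.isIn crit k && payload_is_valid v) = true
    · rw [if_pos h, if_pos (Or.inl h)]
    · rw [if_neg h]
      by_cases h2 : (tl.any fun p => PySem.Str.isIn crit p.1 && payload_is_valid p.2) = true
      · rw [if_pos h2, if_pos (Or.inr h2)]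
      · rw [if_neg h2, if_neg (by tauto)]

-- membership after the per-key marking pass
theorem mem_markAux (crits : List (String × String)) (s : PySem.Set String) (k c : String) :
    (c ∈ crits.foldl (fun s' cr => if PySem.Str.isIn cr.1 k then PySem.Set.add s' cr.1 else s') s) ↔
      c ∈ s ∨ ∃ cr ∈ crits, cr.1 = c ∧ PySem.Str.isIn c k = true := by
  induction crits generalizing s with
  | nil => simp
  | cons hd tl ih =>
    simp only [List.foldl_cons]
    by_cases h : PySem.Str.isIn hd.1 k = true
    · rw [if_pos h, ih]
      simp only [PySem.Set.mem_add, List.mem_cons]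
      constructor
      · rintro ((hs | rfl) | ⟨cr, hcr, rfl, hin⟩)
        · exact Or.inl hs
        · exact Or.inr ⟨hd, Or.inl rfl, rfl, h⟩
        · exact Or.inr ⟨cr, Or.inr hcr, rfl, hin⟩
      · rintro (hs | ⟨cr, (rfl | hcr), rfl, hin⟩)
        · exact Or.inl (Or.inl hs)
        · exact Or.inl (Or.inr rfl)
        · exact Or.inr ⟨cr, hcr, rfl, hin⟩
    · rw [if_neg h, ih]
      constructor
      · rintro (hs | ⟨cr, hcr, rfl, hin⟩)
        · exact Or.inl hs
        · exact Or.inr ⟨cr, List.mem_cons_of_mem _ hcr, rfl, hin⟩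
      · rintro (hs | ⟨cr, hcr, rfl, hin⟩)
        · exact Or.inl hs
        · rcases List.mem_cons.mp hcr with rfl | hcr
          · exact absurd hin h
          · exact Or.inr ⟨cr, hcr, rfl, hin⟩

theorem mem_presentFold (post_data : List (String × String)) (s : PySem.Set String) (c : String)
    (hc : ∃ cr ∈ pvCriteria, cr.1 = c) :
    (c ∈ post_data.foldl (fun s p => if payload_is_valid p.2 then pvMarkKey s p.1 else s) s) ↔
      c ∈ s ∨ ∃ p ∈ post_data, (PySem.Str.isIn c p.1 && payload_is_valid p.2) = true := by
  induction post_data generalizing s with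
  | nil => simp
  | cons hd tl ih =>
    simp only [List.foldl_cons]
    by_cases h : payload_is_valid hd.2 = true
    · rw [if_pos h, ih]
      unfold pvMarkKey
      rw [mem_markAux]
      simp only [List.mem_cons, Bool.and_eq_true]
      constructor
      · rintro ((hs | ⟨cr, hcr, rfl, hin⟩) | ⟨p, hp, hin, hv⟩)
        · exact Or.inl hs
        · exact Or.inr ⟨hd, Or.inl rfl, hin, h⟩
        · exact Or.inr ⟨p, Or.inr hp, hin, hv⟩
      · rintro (hs | ⟨p, (rfl | hp), hin, hv⟩)
        · exact Or.inl (Or.inl hs)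
        · obtain ⟨cr, hcr, rfl⟩ := hc
          exact Or.inl (Or.inr ⟨cr, hcr, rfl, hin⟩)
        · exact Or.inr ⟨p, hp, hin, hv⟩
    · rw [if_neg h, ih]
      simp only [List.mem_cons, Bool.and_eq_true]
      constructor
      · rintro (hs | ⟨p, hp, hin, hv⟩)
        · exact Or.inl hs
        · exact Or.inr ⟨p, Or.inr hp, hin, hv⟩
      · rintro (hs | ⟨p, (rfl | hp), hin, hv⟩)
        · exact Or.inl hs
        · exact absurd hv h
        · exact Or.inr ⟨p, hp, hin, hv⟩

-- ===== VERDICT (by name: the statement is the Claim_ definition above) =====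
theorem get_additional_criteria_py_spec : Claim_equal_get_additional_criteria_py := by
  intro post_data _
  unfold Spec_get_additional_criteria_py
  have hA : get_additional_criteria_py post_data =
      (pvCriteria.filter (fun cr => post_data.any fun p => PySem.Str.isIn cr.1 p.1 && payload_is_valid p.2)).map Prod.snd := by
    unfold get_additional_criteria_py
    simp only [pvInnerA_eq]
    rw [PySem.List.foldl_append_if]
    simp
  rw [hA]
  unfold get_additional_criteria_py_alt
  refine (congrArg (List.map Prod.snd) (List.filter_congr ?_)).symm
  intro cr hcr
  rw [Bool.eq_iff_iff, PySem.Set.contains_iff,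
    mem_presentFold post_data PySem.Set.empty cr.1 ⟨cr, hcr, rfl⟩]
  simp [PySem.Set.empty, List.any_eq_true]
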